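-- pv_equiv track=rewrite | github.com/PavlinGergov/Programming0 | week4/Winter-is-Coming/winter.py | winter_is_coming
-- ===== SOURCE A (Python) =====
-- def winter_is_coming(seasons):
--     count = 0
--     is_true  = False
--     for i,season in enumerate(seasons):
--         if season != "winter":
--             count += 1
--         else:
--             if count == 5:
--                 is_true = True
--             count = 0
--
--         if i == len(seasons) - 1:
--             if count == 5:
--                 is_true = True
--     return is_true
-- ===== SOURCE B (Python) =====
-- def winter_is_coming(seasons):
--     # Representation change: encode the seasons as a marker string and split it on
--     # the winter marker; a run of exactly 5 non-winter seasons is a segment of length 5.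
--     markers = "".join("w" if season == "winter" else "x" for season in seasons)
--     return any(len(group) == 5 for group in markers.split("w"))
-- ===== Notes on version B (the rewrite author's own statement) =====
-- stated objective: simpler
-- what changed: Replaces the index-tracking counter loop (with its duplicated end-of-list check) by a representation change: map seasons to a marker string, split on the winter marker, and test whether any segment has length 5.
import Mathlib
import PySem

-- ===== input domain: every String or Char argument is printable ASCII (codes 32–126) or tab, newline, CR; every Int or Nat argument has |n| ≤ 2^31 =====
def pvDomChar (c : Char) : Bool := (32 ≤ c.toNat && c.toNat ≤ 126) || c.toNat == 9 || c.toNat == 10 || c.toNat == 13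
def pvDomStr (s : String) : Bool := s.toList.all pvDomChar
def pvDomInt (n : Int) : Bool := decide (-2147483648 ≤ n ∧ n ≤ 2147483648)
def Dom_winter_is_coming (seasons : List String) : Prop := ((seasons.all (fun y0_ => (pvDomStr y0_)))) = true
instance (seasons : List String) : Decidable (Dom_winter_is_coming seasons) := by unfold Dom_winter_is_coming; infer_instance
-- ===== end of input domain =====

-- B replaces A's index-tracking counter loop by a representation change (marker string split
-- on the winter marker, any segment of length 5); objective: simpler.


-- ===== PORT A =====
-- A's `for i, season in enumerate(seasons)` loop as structural recursion carrying the
-- running index `i`, the fixed `len(seasons)` as `n`, and the state (count, is_true).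
def winterLoopA (rest : List String) (i : Nat) (n : Nat) (count : Int) (is_true : Bool) : Bool :=
  match rest with
  | [] => is_true
  | season :: rest' =>
    let st : Int × Bool :=
      if season ≠ "winter" then (count + 1, is_true)
      else (0, if count == 5 then true else is_true)
    let st : Int × Bool :=
      if i == n - 1 then (st.1, if st.1 == 5 then true else st.2) else st
    winterLoopA rest' (i + 1) n st.1 st.2

def winter_is_coming (seasons : List String) : Bool :=
  winterLoopA seasons 0 seasons.length 0 false

-- ===== PORT B =====
-- Source B's marker character for one season.
def markB (season : String) : Char := if season == "winter" then 'w' else 'x'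

-- `"".join(markers)` is the marker char list; `str.split("w")` on it is exactly
-- `List.splitOn 'w'` (Python's split with a one-character separator keeps empty segments,
-- as List.splitOn does).
def winter_is_coming_alt (seasons : List String) : Bool :=
  let markers : List Char := seasons.map markB
  (markers.splitOn 'w').any (fun group => group.length == 5)

-- ===== PRECONDITION & SPEC =====
def Spec_winter_is_coming (seasons : List String) (out : Bool) : Prop := out = winter_is_coming_alt seasons
instance (seasons : List String) (out : Bool) : Decidable (Spec_winter_is_coming seasons out) := by unfold Spec_winter_is_coming; infer_instance

-- ===== CLAIM (what is proved, stated in full; the proofs are below) =====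
def Claim_equal_winter_is_coming : Prop := ∀ (seasons : List String), Dom_winter_is_coming seasons → Spec_winter_is_coming seasons (winter_is_coming seasons)

-- ===== LEMMAS AND PROOFS =====

-- Index-free characterisation of A's loop: `goW rest c` is the loop's verdict when the
-- current run already has length `c` and the end-of-list check is folded into the base case.
def goW : List String → Int → Bool
  | [], c => c == 5
  | s :: r, c => if s == "winter" then (c == 5) || goW r 0 else goW r (c + 1)

theorem natCast_beq5 (n : Nat) : (((n : Int)) == 5) = (n == 5) := by
  by_cases h : n = 5
  · simp [h]
  · have h' : ((n : Int)) ≠ 5 := by omega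
    simp [h, h']

theorem int_beq_eq_decide (a b : Int) : (a == b) = decide (a = b) := by
  by_cases h : a = b <;> simp [h]

theorem winterLoopA_eq_goW (rest : List String) (hne : rest ≠ []) :
    ∀ (i n : Nat) (c : Int) (t : Bool), i + rest.length = n →
      winterLoopA rest i n c t = (t || goW rest c) := by
  induction rest with
  | nil => exact absurd rfl hne
  | cons s r ih =>
    intro i n c t hlen
    cases r with
    | nil =>
      have hi : (i == n - 1) = true := by
        simp only [List.length_cons, List.length_nil] at hlen
        simp only [beq_iff_eq]; omega
      by_cases hs : s = "winter" <;>
        · simp only [winterLoopA, goW, hi, hs]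
          by_cases hc : c == 5 <;> simp [hs, hc, Bool.or_comm, int_beq_eq_decide]
    | cons s' r' =>
      have hi : (i == n - 1) = false := by
        simp only [List.length_cons] at hlen
        simp only [beq_eq_false_iff_ne, ne_eq]; omega
      have hlen' : (i + 1) + (s' :: r').length = n := by
        simp only [List.length_cons] at hlen ⊢; omega
      by_cases hs : s = "winter"
      · rw [show winterLoopA (s :: s' :: r') i n c t
              = winterLoopA (s' :: r') (i + 1) n 0 (if c == 5 then true else t) by
            simp [winterLoopA, hi, hs]]
        rw [ih (by simp) (i + 1) n 0 _ hlen']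
        by_cases hc : c == 5 <;> simp [goW, hs, hc]
      · rw [show winterLoopA (s :: s' :: r') i n c t
              = winterLoopA (s' :: r') (i + 1) n (c + 1) t by
            simp [winterLoopA, hi, hs]]
        rw [ih (by simp) (i + 1) n (c + 1) t hlen']
        simp [goW, hs]

theorem winter_is_coming_eq_goW (seasons : List String) :
    winter_is_coming seasons = goW seasons 0 := by
  cases seasons with
  | nil => simp [winter_is_coming, winterLoopA, goW]
  | cons s r =>
    unfold winter_is_coming
    rw [winterLoopA_eq_goW (s :: r) (by simp) 0 (s :: r).length 0 false (Nat.zero_add _)]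
    simp

theorem goW_eq_splitOn (seasons : List String) : ∀ (c : Int),
    goW seasons c =
      match (seasons.map markB).splitOn 'w' with
      | [] => false
      | g :: gs => (c + (g.length : Int) == 5) || gs.any (fun group => group.length == 5) := by
  induction seasons with
  | nil => intro c; simp [goW, List.splitOn, List.splitOnP_nil]
  | cons s r ih =>
    intro c
    obtain ⟨g, gs, hsplit⟩ :=
      List.exists_cons_of_ne_nil (List.splitOnP_ne_nil (fun x => x == 'w') (r.map markB))
    by_cases hs : s = "winter"
    · have hmark : markB s = 'w' := by simp [markB, hs]
      have h0 := ih 0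
      simp only [List.splitOn] at h0 ⊢
      rw [List.map_cons, List.splitOnP_cons, hsplit] at *
      simp only [hmark, beq_self_eq_true, if_true]
      simp only [goW, hs, beq_self_eq_true, if_true, h0, List.any_cons]
      simp [natCast_beq5]
    · have hmark : markB s = 'x' := by simp [markB, hs]
      have h1 := ih (c + 1)
      simp only [List.splitOn] at h1 ⊢
      rw [List.map_cons, List.splitOnP_cons, hsplit] at *
      have hsw : (s == "winter") = false := by simp [hs]
      simp only [goW, hsw, Bool.false_eq_true, if_false, h1, hmark]
      have harith : c + ((g.length : Int) + 1) = (c + 1) + (g.length : Int) := by ring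
      simp [List.modifyHead, harith]

-- ===== VERDICT (by name: the statement is the Claim_ definition above) =====
theorem winter_is_coming_spec : Claim_equal_winter_is_coming := by
  intro seasons _
  unfold Spec_winter_is_coming winter_is_coming_alt
  rw [winter_is_coming_eq_goW, goW_eq_splitOn seasons 0]
  obtain ⟨g, gs, hsplit⟩ :=
    List.exists_cons_of_ne_nil (List.splitOnP_ne_nil (fun x => x == 'w') (seasons.map markB))
  simp only [List.splitOn] at hsplit ⊢
  rw [hsplit]
  simp [natCast_beq5]
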